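-- pv_equiv track=rewrite | github.com/tdseher/addtag-project | source/algorithms/doench.py | fix_flank
-- ===== SOURCE A (Python) =====
-- def fix_flank(upstream='', downstream=''):
--     # if upstream is missing any values, then it must be filled with 'Ns'
--     #   '' becomes 'NNNN'
--     # 'AC' becomes 'NNAC'
--     # same with downstream
--
--     # upstream needs 4 nt sequence
--     us = upstream
--     while(len(us) < 4):
--         us = 'N' + us
--
--     # downstream needs 3 nt sequence
--     ds = downstream
--     while(len(ds) < 3):
--         ds = ds + 'N'
--
--     return us, ds
-- ===== SOURCE B (Python) =====
-- def fix_flank(upstream='', downstream=''):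
--     # Closed form: compute each padding length directly instead of looping.
--     return 'N' * (4 - len(upstream)) + upstream, downstream + 'N' * (3 - len(downstream))
-- ===== Notes on version B (the rewrite author's own statement) =====
-- stated objective: idiomatic
-- what changed: Replaced the two padding while-loops with a direct computation of each padding length followed by a single concatenation (closed form instead of iteration).
import Mathlib
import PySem

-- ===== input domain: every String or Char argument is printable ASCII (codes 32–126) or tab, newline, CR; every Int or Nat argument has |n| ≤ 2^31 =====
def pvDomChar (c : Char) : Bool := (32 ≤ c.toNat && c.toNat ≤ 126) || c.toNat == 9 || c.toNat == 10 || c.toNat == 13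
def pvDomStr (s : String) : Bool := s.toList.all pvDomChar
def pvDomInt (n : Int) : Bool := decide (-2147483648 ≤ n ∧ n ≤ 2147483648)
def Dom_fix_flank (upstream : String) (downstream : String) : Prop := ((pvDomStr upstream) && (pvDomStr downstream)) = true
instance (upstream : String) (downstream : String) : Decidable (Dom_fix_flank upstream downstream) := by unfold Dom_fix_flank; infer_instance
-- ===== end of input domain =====

-- ===== PORT A =====
-- while(len(us) < 4): us = 'N' + us
def padUpA (us : List Char) : List Char :=
  if us.length < 4 then padUpA ('N' :: us) else us
termination_by 4 - us.length

-- while(len(ds) < 3): ds = ds + 'N'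
def padDownA (ds : List Char) : List Char :=
  if ds.length < 3 then padDownA (ds ++ ['N']) else ds
termination_by 3 - ds.length

def fix_flank (upstream : String) (downstream : String) : String × String :=
  (String.mk (padUpA upstream.toList), String.mk (padDownA downstream.toList))

-- ===== PORT B =====
-- B: closed-form padding lengths, no loops (Nat subtraction truncates like 'N'*n == '' for n<=0)
def fix_flank_alt (upstream : String) (downstream : String) : String × String :=
  (String.mk (List.replicate (4 - upstream.toList.length) 'N' ++ upstream.toList),
   String.mk (downstream.toList ++ List.replicate (3 - downstream.toList.length) 'N'))

-- ===== PRECONDITION & SPEC =====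
def Spec_fix_flank (upstream : String) (downstream : String) (out : String × String) : Prop := out = fix_flank_alt upstream downstream
instance (upstream : String) (downstream : String) (out : String × String) : Decidable (Spec_fix_flank upstream downstream out) := by unfold Spec_fix_flank; infer_instance

-- ===== CLAIM (what is proved, stated in full; the proofs are below) =====
def Claim_equal_fix_flank : Prop := ∀ (upstream : String) (downstream : String), Dom_fix_flank upstream downstream → Spec_fix_flank upstream downstream (fix_flank upstream downstream)

-- ===== LEMMAS AND PROOFS =====

lemma padUpA_eq (l : List Char) : padUpA l = List.replicate (4 - l.length) 'N' ++ l := by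
  by_cases h : l.length < 4
  · rw [padUpA]
    simp only [h, if_true]
    rw [padUpA_eq ('N' :: l)]
    have : 4 - l.length = (4 - ('N' :: l).length) + 1 := by simp; omega
    rw [this, List.replicate_succ']
    simp
  · rw [padUpA]
    simp [h]
    omega
termination_by 4 - l.length
decreasing_by simp; omega

lemma padDownA_eq (l : List Char) : padDownA l = l ++ List.replicate (3 - l.length) 'N' := by
  by_cases h : l.length < 3
  · rw [padDownA]
    simp only [h, if_true]
    rw [padDownA_eq (l ++ ['N'])]
    have : 3 - l.length = (3 - (l ++ ['N']).length) + 1 := by simp; omega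
    rw [this, List.replicate_succ]
    simp
  · rw [padDownA]
    simp [h]
    omega
termination_by 3 - l.length
decreasing_by simp; omega

-- ===== VERDICT (by name: the statement is the Claim_ definition above) =====
theorem fix_flank_spec : Claim_equal_fix_flank := by
  intro u d _
  unfold Spec_fix_flank fix_flank fix_flank_alt
  rw [padUpA_eq, padDownA_eq]
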